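-- pv_equiv track=rewrite | github.com/ngyathin16/Canto_ASR_MVP | clean_transcript.py | split_srt_into_chunks
-- ===== SOURCE A (Python) =====
-- def split_srt_into_chunks(content: str, max_lines: int = 50) -> list:
--     """
--     Split SRT content into chunks of approximately max_lines subtitle entries.
--     Each SRT entry consists of: index, timestamp, text, blank line.
--     """
--     lines = content.strip().split('\n')
--
--     if len(lines) <= max_lines * 4:
--         return [content]
--
--     chunks = []
--     current_chunk = []
--     line_count = 0
--
--     i = 0
--     while i < len(lines):
--         if lines[i].strip().isdigit():
--             entry_lines = []
--             while i < len(lines) and lines[i].strip():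
--                 entry_lines.append(lines[i])
--                 i += 1
--             entry_lines.append('')
--             current_chunk.extend(entry_lines)
--             line_count += 1
--
--             if line_count >= max_lines:
--                 chunks.append('\n'.join(current_chunk))
--                 current_chunk = []
--                 line_count = 0
--         else:
--             i += 1
--
--     if current_chunk:
--         chunks.append('\n'.join(current_chunk))
--
--     return chunks if chunks else [content]
-- ===== SOURCE B (Python) =====
-- def split_srt_into_chunks(content: str, max_lines: int = 50) -> list:
--     """Parse entries first, then chunk them by slicing — two simple passes."""
--     lines = content.strip().split('\n')
--
--     if len(lines) <= max_lines * 4: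
--         return [content]
--
--     # pass 1: collect each subtitle entry as its own block (trailing blank kept)
--     entries = []
--     i = 0
--     n = len(lines)
--     while i < n:
--         if lines[i].strip().isdigit():
--             block = []
--             while i < n and lines[i].strip():
--                 block.append(lines[i])
--                 i += 1
--             block.append('')
--             entries.append(block)
--         else:
--             i += 1
--
--     if not entries:
--         return [content]
--
--     # pass 2: group entries in slices of `step` and join each group
--     step = max(max_lines, 1)
--     return ['\n'.join(line for block in entries[j:j + step] for line in block)
--             for j in range(0, len(entries), step)]
-- ===== Notes on version B (the rewrite author's own statement) =====
-- stated objective: simpler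
-- what changed: B replaces A's single interleaved loop with mutable chunk/count state by two plain passes: parse the subtitle entries into a list of blocks, then group that list in slices of max(max_lines,1) and join each group.
import Mathlib
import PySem

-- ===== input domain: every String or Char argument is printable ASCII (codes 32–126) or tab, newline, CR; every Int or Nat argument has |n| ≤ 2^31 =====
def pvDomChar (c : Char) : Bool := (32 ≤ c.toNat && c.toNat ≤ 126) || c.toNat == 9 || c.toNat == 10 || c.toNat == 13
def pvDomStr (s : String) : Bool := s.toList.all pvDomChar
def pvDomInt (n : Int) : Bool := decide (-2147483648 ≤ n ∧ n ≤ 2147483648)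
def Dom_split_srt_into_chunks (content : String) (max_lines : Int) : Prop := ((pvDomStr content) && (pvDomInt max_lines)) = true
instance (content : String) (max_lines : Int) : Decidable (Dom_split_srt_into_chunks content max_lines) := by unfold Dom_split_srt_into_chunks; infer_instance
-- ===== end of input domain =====

-- B parses the entries into a list of blocks first and then chunks that list in
-- slices, instead of A's one interleaved loop with chunk/count state (objective: simpler).

-- ===== PORT A =====
-- inner while loop: collect lines while lines[i].strip() is truthy
def pvASpan : List String → List String × List String
  | [] => ([], [])
  | l :: rest =>
    if PySem.Str.strip l ≠ "" then
      ((l :: (pvASpan rest).1), (pvASpan rest).2)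
    else ([], l :: rest)

theorem pvASpan_snd_length_le : ∀ xs : List String, (pvASpan xs).2.length ≤ xs.length
  | [] => by simp [pvASpan]
  | l :: rest => by
    by_cases h : PySem.Str.strip l ≠ ""
    · simp only [pvASpan, if_pos h]
      exact Nat.le_succ_of_le (pvASpan_snd_length_le rest)
    · simp [pvASpan, if_neg h]

theorem pv_strip_ne_of_isdigit (s : String) (h : PySem.Str.strIsdigit (PySem.Str.strip s) = true) :
    PySem.Str.strip s ≠ "" := by
  intro he; rw [he] at h; exact absurd h (by decide)

-- the outer while loop of A, plus the trailing final-flush 'if current_chunk'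
def pvALoop (ml : Int) : List String → List String → List String → Int → List String
  | [], chunks, cur, _ =>
      if cur ≠ [] then chunks ++ [PySem.Str.join "\n" cur] else chunks
  | l :: rest, chunks, cur, cnt =>
    if h : PySem.Str.strIsdigit (PySem.Str.strip l) = true then
      if cnt + 1 ≥ ml then
        pvALoop ml (pvASpan (l :: rest)).2
          (chunks ++ [PySem.Str.join "\n" (cur ++ ((pvASpan (l :: rest)).1 ++ [""]))]) [] 0
      else
        pvALoop ml (pvASpan (l :: rest)).2 chunks (cur ++ ((pvASpan (l :: rest)).1 ++ [""])) (cnt + 1)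
    else
      pvALoop ml rest chunks cur cnt
  termination_by rem => rem.length
  decreasing_by
  · have hne := pv_strip_ne_of_isdigit l h
    simp only [pvASpan, if_pos hne]
    have := pvASpan_snd_length_le rest
    simpa using Nat.lt_succ_of_le this
  · have hne := pv_strip_ne_of_isdigit l h
    simp only [pvASpan, if_pos hne]
    have := pvASpan_snd_length_le rest
    simpa using Nat.lt_succ_of_le this
  · simp

def split_srt_into_chunks (content : String) (max_lines : Int) : List String :=
  let lines := (PySem.Str.split? (PySem.Str.strip content) "\n").getD []
  if (lines.length : Int) ≤ max_lines * 4 then [content]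
  else
    let chunks := pvALoop max_lines lines [] [] 0
    if chunks ≠ [] then chunks else [content]

-- ===== PORT B =====
-- Source B's inner while loop collecting one entry's lines
def pvBBlock : List String → List String × List String
  | [] => ([], [])
  | l :: rest =>
    if PySem.Str.strip l ≠ "" then
      ((l :: (pvBBlock rest).1), (pvBBlock rest).2)
    else ([], l :: rest)

theorem pvBBlock_eq_pvASpan : ∀ xs : List String, pvBBlock xs = pvASpan xs
  | [] => rfl
  | l :: rest => by
    by_cases h : PySem.Str.strip l ≠ "" <;>
      simp [pvBBlock, pvASpan, h, pvBBlock_eq_pvASpan rest]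

-- pass 1 of Source B: the list of entry blocks (each with its trailing '')
def pvBParse : List String → List (List String)
  | [] => []
  | l :: rest =>
    if h : PySem.Str.strIsdigit (PySem.Str.strip l) = true then
      ((pvBBlock (l :: rest)).1 ++ [""]) :: pvBParse (pvBBlock (l :: rest)).2
    else
      pvBParse rest
  termination_by xs => xs.length
  decreasing_by
  · have hne := pv_strip_ne_of_isdigit l h
    rw [pvBBlock_eq_pvASpan]
    simp only [pvASpan, if_pos hne]
    have := pvASpan_snd_length_le rest
    simpa using Nat.lt_succ_of_le this
  · simp

-- pass 2 of Source B: group the entry list in slices of `step` (call sites have step ≥ 1,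
-- where e :: es.take (step-1) is exactly the slice entries[j:j+step]) and join each group
def pvBChunk (step : Nat) : List (List String) → List String
  | [] => []
  | e :: es =>
      PySem.Str.join "\n" ((e :: es.take (step - 1)).flatten) ::
        pvBChunk step (es.drop (step - 1))
  termination_by es => es.length
  decreasing_by
    simp only [List.length_drop, List.length_cons]
    omega

def split_srt_into_chunks_alt (content : String) (max_lines : Int) : List String :=
  let lines := (PySem.Str.split? (PySem.Str.strip content) "\n").getD []
  if (lines.length : Int) ≤ max_lines * 4 then [content]
  else
    let entries := pvBParse lines
    if entries = [] then [content]
    else pvBChunk (max max_lines 1).toNat entries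

-- ===== PRECONDITION & SPEC =====
def Spec_split_srt_into_chunks (content : String) (max_lines : Int) (out : List String) : Prop := out = split_srt_into_chunks_alt content max_lines
instance (content : String) (max_lines : Int) (out : List String) : Decidable (Spec_split_srt_into_chunks content max_lines out) := by unfold Spec_split_srt_into_chunks; infer_instance

-- ===== CLAIM (what is proved, stated in full; the proofs are below) =====
def Claim_equal_split_srt_into_chunks : Prop := ∀ (content : String) (max_lines : Int), Dom_split_srt_into_chunks content max_lines → Spec_split_srt_into_chunks content max_lines (split_srt_into_chunks content max_lines)

-- ===== LEMMAS AND PROOFS =====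

theorem pvBChunk_first (g : Nat) (hg : 0 < g) (front tail : List (List String))
    (hf : front.length = g) :
    pvBChunk g (front ++ tail)
      = PySem.Str.join "\n" front.flatten :: pvBChunk g tail := by
  rcases front with _ | ⟨f0, fs⟩
  · simp at hf; omega
  · have hfs : fs.length = g - 1 := by simp at hf; omega
    rw [List.cons_append, pvBChunk, ← hfs, List.take_left, List.drop_left]

theorem pvBChunk_small (g : Nat) (hg : 0 < g) (L : List (List String))
    (hne : L ≠ []) (hlt : L.length < g) :
    pvBChunk g L = [PySem.Str.join "\n" L.flatten] := by
  match L with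
  | [] => exact absurd rfl hne
  | e :: es =>
    have h1 : es.length ≤ g - 1 := by simp at hlt; omega
    simp [pvBChunk, List.take_of_length_le h1, List.drop_eq_nil_of_le h1, pvBChunk]

theorem pv_flush_iff (ml : Int) (g p : Nat) (hg : g = (max ml 1).toNat) (hp : p < g) :
    ((p : Int) + 1 ≥ ml ↔ p + 1 = g) := by
  rcases le_total ml 1 with h | h
  · have : g = 1 := by rw [hg, max_eq_right h]; rfl
    omega
  · have : (g : Int) = ml := by
      rw [hg, max_eq_left h, Int.toNat_of_nonneg (by omega)]
    omega

theorem pv_flatten_ne (pend : List (List String)) (hne : pend ≠ [])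
    (hb : ∀ b ∈ pend, b ≠ []) : pend.flatten ≠ [] := by
  match pend with
  | [] => exact absurd rfl hne
  | p :: ps =>
    have hp : p ≠ [] := hb p (by simp)
    simp only [List.flatten_cons]
    intro h
    exact hp (List.eq_nil_of_append_eq_nil h).1

theorem pv_loop_eq (ml : Int) (g : Nat) (hg : g = (max ml 1).toNat) :
    ∀ n (rem : List String), rem.length ≤ n → ∀ (pend : List (List String)) (chunks : List String),
      (∀ b ∈ pend, b ≠ []) → pend.length < g →
      pvALoop ml rem chunks pend.flatten (pend.length : Int)
        = chunks ++ pvBChunk g (pend ++ pvBParse rem) := by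
  have hg1 : 0 < g := by
    rw [hg]; have : (1 : Int) ≤ max ml 1 := le_max_right _ _; omega
  intro n
  induction n with
  | zero =>
    intro rem hlen pend chunks hb hlt
    have : rem = [] := List.eq_nil_of_length_eq_zero (Nat.le_zero.mp hlen)
    subst this
    simp only [pvALoop, pvBParse, List.append_nil]
    by_cases hpe : pend = []
    · subst hpe; simp [pvBChunk]
    · rw [if_pos (pv_flatten_ne pend hpe hb),
          pvBChunk_small g hg1 pend hpe hlt]
  | succ n ih =>
    intro rem hlen pend chunks hb hlt
    match rem with
    | [] =>
      simp only [pvALoop, pvBParse, List.append_nil]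
      by_cases hpe : pend = []
      · subst hpe; simp [pvBChunk]
      · rw [if_pos (pv_flatten_ne pend hpe hb),
            pvBChunk_small g hg1 pend hpe hlt]
    | l :: rest =>
      by_cases hd : PySem.Str.strIsdigit (PySem.Str.strip l) = true
      · have hne := pv_strip_ne_of_isdigit l hd
        have hr : (pvASpan (l :: rest)).2.length ≤ n := by
          simp only [pvASpan, if_pos hne]
          have := pvASpan_snd_length_le rest
          simp at hlen; omega
        have hparse : pvBParse (l :: rest)
            = ((pvASpan (l :: rest)).1 ++ [""]) :: pvBParse (pvASpan (l :: rest)).2 := by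
          rw [pvBParse, dif_pos hd, pvBBlock_eq_pvASpan]
        by_cases hfl : ((pend.length : Int) + 1 ≥ ml)
        · -- flush
          have hlen_eq : pend.length + 1 = g := (pv_flush_iff ml g pend.length hg hlt).mp hfl
          rw [pvALoop, dif_pos hd, if_pos hfl]
          have ih0 := ih (pvASpan (l :: rest)).2 hr []
            (chunks ++ [PySem.Str.join "\n"
              (pend.flatten ++ ((pvASpan (l :: rest)).1 ++ [""]))])
            (by simp) hg1
          simp only [List.flatten_nil, List.length_nil, Nat.cast_zero, List.nil_append] at ih0
          rw [ih0, hparse]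
          have hsplit : pend ++ ((pvASpan (l :: rest)).1 ++ [""]) :: pvBParse (pvASpan (l :: rest)).2
              = (pend ++ [(pvASpan (l :: rest)).1 ++ [""]]) ++ pvBParse (pvASpan (l :: rest)).2 := by
            simp
          rw [hsplit, pvBChunk_first g hg1 (pend ++ [(pvASpan (l :: rest)).1 ++ [""]])
                (pvBParse (pvASpan (l :: rest)).2) (by simp; omega)]
          simp [List.flatten_append]
        · -- no flush
          have hlt' : pend.length + 1 < g := by
            have := (pv_flush_iff ml g pend.length hg hlt).not.mp hfl
            omega
          rw [pvALoop, dif_pos hd, if_neg hfl]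
          have ih0 := ih (pvASpan (l :: rest)).2 hr
            (pend ++ [(pvASpan (l :: rest)).1 ++ [""]]) chunks
            (by intro b hbmem
                rcases List.mem_append.mp hbmem with h1 | h1
                · exact hb b h1
                · simp at h1; subst h1; simp)
            (by simpa using hlt')
          simp only [List.flatten_append, List.flatten_cons, List.flatten_nil,
            List.append_nil, List.length_append, List.length_cons, List.length_nil,
            Nat.cast_add, Nat.cast_one, Nat.zero_add] at ih0
          rw [show ((pend.length : Int) + 1) = ((pend.length : Int) + (0 + 1)) by ring] at ih0 ⊢
          rw [ih0, hparse, List.append_assoc]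
          simp
      · rw [pvALoop, dif_neg hd]
        have hparse : pvBParse (l :: rest) = pvBParse rest := by
          rw [pvBParse, dif_neg hd]
        rw [hparse]
        exact ih rest (by simp at hlen; omega) pend chunks hb hlt

theorem pvBChunk_eq_nil_iff (g : Nat) (L : List (List String)) :
    pvBChunk g L = [] ↔ L = [] := by
  match L with
  | [] => simp [pvBChunk]
  | e :: es => simp [pvBChunk]

-- ===== VERDICT (by name: the statement is the Claim_ definition above) =====
theorem split_srt_into_chunks_spec : Claim_equal_split_srt_into_chunks := by
  intro content ml _
  unfold Spec_split_srt_into_chunks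
  simp only [split_srt_into_chunks, split_srt_into_chunks_alt]
  generalize (PySem.Str.split? (PySem.Str.strip content) "\n").getD [] = L
  by_cases hearly : ((L.length : Int) ≤ ml * 4)
  · rw [if_pos hearly, if_pos hearly]
  · rw [if_neg hearly, if_neg hearly]
    have hg1 : 0 < (max ml 1).toNat := by
      have : (1 : Int) ≤ max ml 1 := le_max_right _ _; omega
    have hmain := pv_loop_eq ml (max ml 1).toNat rfl L.length L le_rfl [] []
      (by simp) hg1
    simp only [List.flatten_nil, List.length_nil, Nat.cast_zero, List.nil_append] at hmain
    rw [hmain]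
    by_cases hpe : pvBParse L = []
    · simp [hpe, pvBChunk]
    · rw [if_pos (by rw [Ne, pvBChunk_eq_nil_iff]; exact hpe), if_neg hpe]
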